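-- pv_equiv track=rewrite | github.com/ernestdarrow/nelsoncounty | generate_simple_image_descriptions.py | generate_simple_description
-- ===== SOURCE A (Python) =====
-- def generate_simple_description(listing_name, image_num, description_text=''):
--     """Generate a simple description from listing name and image number"""
--     # Base descriptions
--     image_descriptions = {
--         1: 'Exterior view of {name}',
--         2: 'Interior view of {name}',
--         3: 'Additional photo of {name}'
--     }
--
--     # Get base description
--     base_desc = image_descriptions.get(image_num, f'Photo of {listing_name}')
--
--     # If there's description text, try to extract keywords
--     if description_text:
--         desc_lower = description_text.lower()
--         # Check for keywords to make description more specific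
--         if any(word in desc_lower for word in ['coffee', 'cafe', 'bakery', 'restaurant', 'dining']):
--             base_desc = f'Dining area at {listing_name}' if image_num > 1 else f'Exterior of {listing_name} restaurant'
--         elif any(word in desc_lower for word in ['cabin', 'cottage', 'lodge', 'house', 'rental']):
--             base_desc = f'Interior of {listing_name}' if image_num > 1 else f'Exterior view of {listing_name}'
--         elif any(word in desc_lower for word in ['trail', 'hike', 'outdoor', 'nature']):
--             base_desc = f'Scenic view from {listing_name}'
--         elif any(word in desc_lower for word in ['vineyard', 'winery', 'tasting']):
--             base_desc = f'Tasting room at {listing_name}' if image_num > 1 else f'Vineyard at {listing_name}'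
--         elif any(word in desc_lower for word in ['brewery', 'beer', 'cider']):
--             base_desc = f'Taproom at {listing_name}' if image_num > 1 else f'Exterior of {listing_name} brewery'
--         elif any(word in desc_lower for word in ['market', 'deli', 'store', 'grocery']):
--             base_desc = f'Interior of {listing_name}' if image_num > 1 else f'Storefront of {listing_name}'
--         elif any(word in desc_lower for word in ['farm', 'orchard']):
--             base_desc = f'Farm view at {listing_name}' if image_num > 1 else f'Exterior of {listing_name} farm'
--         elif any(word in desc_lower for word in ['museum', 'heritage', 'historical']):
--             base_desc = f'Exhibit at {listing_name}' if image_num > 1 else f'Exterior of {listing_name} museum'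
--
--     # Format with listing name
--     description = base_desc.format(name=listing_name)
--
--     # Ensure max 15 words
--     words = description.split()
--     if len(words) > 15:
--         description = ' '.join(words[:15])
--
--     return description
-- ===== SOURCE B (Python) =====
-- # Flat keyword index + min-reduction: every keyword is flattened into (keyword, group)
-- # pairs, ALL matching groups are collected order-independently and the arithmetic min
-- # picks the highest-priority group, replacing A's ordered if/elif chain; '{name}' is
-- # substituted once at the end.
-- _KEYWORD_GROUPS = [
--     ['coffee', 'cafe', 'bakery', 'restaurant', 'dining'],
--     ['cabin', 'cottage', 'lodge', 'house', 'rental'],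
--     ['trail', 'hike', 'outdoor', 'nature'],
--     ['vineyard', 'winery', 'tasting'],
--     ['brewery', 'beer', 'cider'],
--     ['market', 'deli', 'store', 'grocery'],
--     ['farm', 'orchard'],
--     ['museum', 'heritage', 'historical'],
-- ]
-- _FLAT = [(kw, g) for g, kws in enumerate(_KEYWORD_GROUPS) for kw in kws]
-- _TEMPLATES = [
--     ('Dining area at {name}', 'Exterior of {name} restaurant'),
--     ('Interior of {name}', 'Exterior view of {name}'),
--     ('Scenic view from {name}', 'Scenic view from {name}'),
--     ('Tasting room at {name}', 'Vineyard at {name}'),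
--     ('Taproom at {name}', 'Exterior of {name} brewery'),
--     ('Interior of {name}', 'Storefront of {name}'),
--     ('Farm view at {name}', 'Exterior of {name} farm'),
--     ('Exhibit at {name}', 'Exterior of {name} museum'),
-- ]
-- _BASE = {
--     1: 'Exterior view of {name}',
--     2: 'Interior view of {name}',
--     3: 'Additional photo of {name}',
-- }
--
--
-- def generate_simple_description(listing_name, image_num, description_text=''):
--     """Generate a simple description from listing name and image number"""
--     template = _BASE.get(image_num, 'Photo of {name}')
--     if description_text:
--         desc_lower = description_text.lower()
--         matches = [g for kw, g in _FLAT if kw in desc_lower]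
--         if matches:
--             if_gt1, otherwise = _TEMPLATES[min(matches)]
--             template = if_gt1 if image_num > 1 else otherwise
--     description = template.replace('{name}', listing_name)
--     words = description.split()
--     return ' '.join(words[:15]) if len(words) > 15 else description
-- ===== Notes on version B (the rewrite author's own statement) =====
-- stated objective: alternative
-- what changed: A's ordered eight-branch if/elif keyword chain with short-circuit priority is replaced by a flat (keyword, group) index built once by flattening the groups; ALL matching group numbers are collected order-independently and the arithmetic min picks the group, which indexes a template table; '{name}' is substituted once at the end instead of A's trailing .format.
-- outside the precondition, e.g. on generate_simple_description('{x}', 5, ''): A raises KeyError, B returns 'Photo of {x}'; on generate_simple_description('a}b', 5, ''): A raises ValueError, B returns 'Photo of a}b'; on generate_simple_description('{{', 5, ''): A returns 'Photo of {', B returns 'Photo of {{'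
import Mathlib
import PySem

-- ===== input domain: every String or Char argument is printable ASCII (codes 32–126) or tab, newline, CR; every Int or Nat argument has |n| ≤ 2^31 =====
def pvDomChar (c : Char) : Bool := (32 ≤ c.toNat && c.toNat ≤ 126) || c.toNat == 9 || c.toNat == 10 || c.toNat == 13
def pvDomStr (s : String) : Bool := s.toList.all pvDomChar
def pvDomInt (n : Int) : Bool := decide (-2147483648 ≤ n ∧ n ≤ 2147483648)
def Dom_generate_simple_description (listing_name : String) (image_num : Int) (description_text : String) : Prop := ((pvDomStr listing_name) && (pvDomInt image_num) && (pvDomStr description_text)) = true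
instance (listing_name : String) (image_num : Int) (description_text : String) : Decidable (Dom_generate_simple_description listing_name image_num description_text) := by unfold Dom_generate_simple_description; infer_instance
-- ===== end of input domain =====

-- B replaces A's ordered if/elif keyword chain by a flat (keyword, group) index; all matching
-- groups are collected and the arithmetic min picks the group's templates (objective: alternative).


-- ===== PORT A =====
-- shared final lines of both Pythons: 'description.split()' and the 15-word cap
def pvTruncate (description : String) : String :=
  let words := PySem.Str.split₀ description
  if PySem.List.len words > 15 then PySem.Str.join " " (PySem.List.slice words none (some 15)) else description

-- A's keyword if/elif chain, verbatim (desc_lower = description_text.lower(), base_desc = the dict value)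
def pvKeywordChain (listing_name : String) (image_num : Int) (desc_lower : String) (base_desc : String) : String :=
  if (["coffee", "cafe", "bakery", "restaurant", "dining"] : List String).any (fun word => PySem.Str.isIn word desc_lower) then
    (if image_num > 1 then "Dining area at " ++ listing_name else "Exterior of " ++ listing_name ++ " restaurant")
  else if (["cabin", "cottage", "lodge", "house", "rental"] : List String).any (fun word => PySem.Str.isIn word desc_lower) then
    (if image_num > 1 then "Interior of " ++ listing_name else "Exterior view of " ++ listing_name)
  else if (["trail", "hike", "outdoor", "nature"] : List String).any (fun word => PySem.Str.isIn word desc_lower) then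
    "Scenic view from " ++ listing_name
  else if (["vineyard", "winery", "tasting"] : List String).any (fun word => PySem.Str.isIn word desc_lower) then
    (if image_num > 1 then "Tasting room at " ++ listing_name else "Vineyard at " ++ listing_name)
  else if (["brewery", "beer", "cider"] : List String).any (fun word => PySem.Str.isIn word desc_lower) then
    (if image_num > 1 then "Taproom at " ++ listing_name else "Exterior of " ++ listing_name ++ " brewery")
  else if (["market", "deli", "store", "grocery"] : List String).any (fun word => PySem.Str.isIn word desc_lower) then
    (if image_num > 1 then "Interior of " ++ listing_name else "Storefront of " ++ listing_name)
  else if (["farm", "orchard"] : List String).any (fun word => PySem.Str.isIn word desc_lower) then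
    (if image_num > 1 then "Farm view at " ++ listing_name else "Exterior of " ++ listing_name ++ " farm")
  else if (["museum", "heritage", "historical"] : List String).any (fun word => PySem.Str.isIn word desc_lower) then
    (if image_num > 1 then "Exhibit at " ++ listing_name else "Exterior of " ++ listing_name ++ " museum")
  else base_desc

def generate_simple_description (listing_name : String) (image_num : Int) (description_text : String) : String :=
  let image_descriptions : PySem.Dict Int String :=
    PySem.Dict.ofList [(1, "Exterior view of {name}"), (2, "Interior view of {name}"), (3, "Additional photo of {name}")]
  let base_desc := PySem.Dict.getD image_descriptions image_num ("Photo of " ++ listing_name)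
  let base_desc :=
    if description_text ≠ "" then
      pvKeywordChain listing_name image_num (PySem.Str.lower description_text) base_desc
    else base_desc
  -- base_desc.format(name=listing_name): under Pre_ (listing_name brace-free) the only format field
  -- ever present is the literal '{name}', so .format is exactly the replacement of '{name}' — exact on Pre_.
  pvTruncate (PySem.Str.replace base_desc "{name}" listing_name)

-- ===== PORT B =====
def pvGroups : List (List String) :=
  [["coffee", "cafe", "bakery", "restaurant", "dining"],
   ["cabin", "cottage", "lodge", "house", "rental"],
   ["trail", "hike", "outdoor", "nature"],
   ["vineyard", "winery", "tasting"],
   ["brewery", "beer", "cider"],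
   ["market", "deli", "store", "grocery"],
   ["farm", "orchard"],
   ["museum", "heritage", "historical"]]

-- _FLAT = [(kw, g) for g, kws in enumerate(_KEYWORD_GROUPS) for kw in kws]
def pvFlat : List (String × Int) :=
  (PySem.List.enumerate pvGroups 0).flatMap (fun p => p.2.map (fun kw => (kw, p.1)))

def pvTemplates : List (String × String) :=
  [("Dining area at {name}", "Exterior of {name} restaurant"),
   ("Interior of {name}", "Exterior view of {name}"),
   ("Scenic view from {name}", "Scenic view from {name}"),
   ("Tasting room at {name}", "Vineyard at {name}"),
   ("Taproom at {name}", "Exterior of {name} brewery"),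
   ("Interior of {name}", "Storefront of {name}"),
   ("Farm view at {name}", "Exterior of {name} farm"),
   ("Exhibit at {name}", "Exterior of {name} museum")]

def pvBase : PySem.Dict Int String :=
  PySem.Dict.ofList [(1, "Exterior view of {name}"), (2, "Interior view of {name}"), (3, "Additional photo of {name}")]

-- 'matches = [g for kw, g in _FLAT if kw in desc_lower]'
def pvSel (desc_lower : String) (pr : String × Int) : Option Int :=
  if PySem.Str.isIn pr.1 desc_lower then some pr.2 else none

-- 'matches = [g for kw, g in _FLAT if kw in desc_lower]; if matches: _TEMPLATES[min(matches)] ...':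
-- min? is none exactly when the match list is empty; the index is always in range, getD only makes the lookup total
def pvMinPick (image_num : Int) (template desc_lower : String) : String :=
  let hits := pvFlat.filterMap (pvSel desc_lower)
  match PySem.List.min? hits (fun x => x) with
  | some g =>
      let pr := (PySem.List.pyGet? pvTemplates g).getD ("", "")
      if image_num > 1 then pr.1 else pr.2
  | none => template

def generate_simple_description_alt (listing_name : String) (image_num : Int) (description_text : String) : String :=
  let template := PySem.Dict.getD pvBase image_num "Photo of {name}"
  let template :=
    if description_text ≠ "" then
      pvMinPick image_num template (PySem.Str.lower description_text)
    else template
  pvTruncate (PySem.Str.replace template "{name}" listing_name)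

-- ===== PRECONDITION & SPEC =====
-- Pre_ excludes listing_name containing '{' or '}': A's trailing .format on the already-interpolated
-- description raises ValueError/KeyError/IndexError on most such names and double-formats the rest,
-- an artefact of formatting an interpolated string.
def Pre_generate_simple_description (listing_name : String) (image_num : Int) (description_text : String) : Prop :=
  PySem.Str.isIn "{" listing_name = false ∧ PySem.Str.isIn "}" listing_name = false

instance (listing_name : String) (image_num : Int) (description_text : String) : Decidable (Pre_generate_simple_description listing_name image_num description_text) := by unfold Pre_generate_simple_description; infer_instance

def pvWitness_generate_simple_description : String × Int × String := ("Blue Ridge Cabin", 1, "Cozy cabin in the woods")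

def Spec_generate_simple_description (listing_name : String) (image_num : Int) (description_text : String) (out : String) : Prop := out = generate_simple_description_alt listing_name image_num description_text
instance (listing_name : String) (image_num : Int) (description_text : String) (out : String) : Decidable (Spec_generate_simple_description listing_name image_num description_text out) := by unfold Spec_generate_simple_description; infer_instance

-- ===== CLAIM (what is proved, stated in full; the proofs are below) =====
def Claim_equal_generate_simple_description : Prop := ∀ (listing_name : String) (image_num : Int) (description_text : String), Dom_generate_simple_description listing_name image_num description_text → Pre_generate_simple_description listing_name image_num description_text → Spec_generate_simple_description listing_name image_num description_text (generate_simple_description listing_name image_num description_text)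

-- ===== LEMMAS AND PROOFS =====

def pvPat : List Char := ['{', 'n', 'a', 'm', 'e', '}']

lemma pvPat_eq : "{name}".toList = pvPat := by decide

lemma pv_go_nomatch (r : List Char) : ∀ (l acc : List Char) (fuel : Nat), l.length ≤ fuel → '{' ∉ l →
    PySem.Chars.replace.go pvPat r fuel l acc = acc.reverse ++ l := by
  intro l
  induction l with
  | nil => intro acc fuel _ _; cases fuel <;> simp [PySem.Chars.replace.go]
  | cons c t ih =>
    intro acc fuel hlen hmem
    cases fuel with
    | zero => simp at hlen
    | succ f =>
      have hc : c ≠ '{' := fun h => hmem (h ▸ List.mem_cons_self ..)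
      have hpre : (pvPat).isPrefixOf (c :: t) = false := by
        simp [pvPat, List.isPrefixOf]
        intro h; exact absurd h.symm hc
      rw [PySem.Chars.replace.go]
      simp only [hpre, Bool.false_eq_true, if_false]
      rw [ih (c :: acc) f (by simpa using hlen) (fun h => hmem (List.mem_cons_of_mem _ h))]
      simp

lemma pv_go_once (r : List Char) : ∀ (a b acc : List Char) (fuel : Nat),
    (a ++ pvPat ++ b).length ≤ fuel → '{' ∉ a → '{' ∉ b →
    PySem.Chars.replace.go pvPat r fuel (a ++ pvPat ++ b) acc = acc.reverse ++ a ++ r ++ b := by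
  intro a
  induction a with
  | nil =>
    intro b acc fuel hlen ha hb
    cases fuel with
    | zero => simp [pvPat] at hlen
    | succ f =>
      have hshape : ([] : List Char) ++ pvPat ++ b = '{' :: ('n'::'a'::'m'::'e'::'}':: b) := by
        simp [pvPat]
      rw [hshape, PySem.Chars.replace.go]
      have hpre : (pvPat).isPrefixOf ('{' :: ('n'::'a'::'m'::'e'::'}':: b)) = true := by
        simp [pvPat, List.isPrefixOf]
      simp only [hpre, if_true]
      have hdrop : List.drop pvPat.length ('{' :: ('n'::'a'::'m'::'e'::'}':: b)) = b := by
        simp [pvPat]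
      rw [hdrop, pv_go_nomatch r b (r.reverse ++ acc) f (by simp [pvPat] at hlen ⊢; omega) hb]
      simp
  | cons c t ih =>
    intro b acc fuel hlen ha hb
    cases fuel with
    | zero => simp at hlen
    | succ f =>
      have hc : c ≠ '{' := fun h => ha (h ▸ List.mem_cons_self ..)
      have hpre : (pvPat).isPrefixOf (c :: (t ++ pvPat ++ b)) = false := by
        simp [pvPat, List.isPrefixOf]
        intro h; exact absurd h.symm hc
      have hshape : (c :: t) ++ pvPat ++ b = c :: (t ++ pvPat ++ b) := by simp
      rw [hshape, PySem.Chars.replace.go]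
      simp only [hpre, Bool.false_eq_true, if_false]
      rw [ih b (c :: acc) f (by simp at hlen ⊢; omega) (fun h => ha (List.mem_cons_of_mem _ h)) hb]
      simp

lemma pv_replace_nomatch (s r : List Char) (h : '{' ∉ s) : PySem.Chars.replace s pvPat r = s := by
  rw [PySem.Chars.replace]
  have he : pvPat.isEmpty = false := by simp [pvPat]
  simp only [he, Bool.false_eq_true, if_false]
  simpa using pv_go_nomatch r s [] s.length le_rfl h

lemma pv_replace_once (a b r : List Char) (ha : '{' ∉ a) (hb : '{' ∉ b) :
    PySem.Chars.replace (a ++ pvPat ++ b) pvPat r = a ++ r ++ b := by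
  rw [PySem.Chars.replace]
  have he : pvPat.isEmpty = false := by simp [pvPat]
  simp only [he, Bool.false_eq_true, if_false]
  simpa using pv_go_once r a b [] (a ++ pvPat ++ b).length le_rfl ha hb

lemma pv_strReplace_nomatch (s L : String) (h : '{' ∉ s.toList) :
    PySem.Str.replace s "{name}" L = s := by
  show String.ofList (PySem.Chars.replace s.toList "{name}".toList L.toList) = s
  rw [pvPat_eq, pv_replace_nomatch _ _ h, String.ofList_toList]

-- keyword branch, template with a suffix after {name}
lemma pv_leaf2 (pre suf L tmpl : String) (hL : '{' ∉ L.toList)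
    (hpre : '{' ∉ pre.toList) (hsuf : '{' ∉ suf.toList)
    (ht : tmpl.toList = pre.toList ++ pvPat ++ suf.toList) :
    PySem.Str.replace (pre ++ L ++ suf) "{name}" L = PySem.Str.replace tmpl "{name}" L := by
  rw [pv_strReplace_nomatch (pre ++ L ++ suf) L (by
    simp only [String.toList_append, List.mem_append]
    rintro ((h | h) | h)
    exacts [hpre h, hL h, hsuf h])]
  show _ = String.ofList (PySem.Chars.replace tmpl.toList "{name}".toList L.toList)
  rw [ht, pvPat_eq, pv_replace_once _ _ _ hpre hsuf, ← String.toList_append, ← String.toList_append,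
    String.ofList_toList]

-- keyword branch, template ending in {name}
lemma pv_leaf1 (pre L tmpl : String) (hL : '{' ∉ L.toList)
    (hpre : '{' ∉ pre.toList)
    (ht : tmpl.toList = pre.toList ++ pvPat) :
    PySem.Str.replace (pre ++ L) "{name}" L = PySem.Str.replace tmpl "{name}" L := by
  have := pv_leaf2 pre "" L tmpl hL hpre (by simp) (by simpa using ht)
  simpa using this

-- the un-keyworded case: same dict, different default template
lemma pv_dict_leaf (d : PySem.Dict Int String) (n : Int) (L : String) (hL : '{' ∉ L.toList) :
    PySem.Str.replace (PySem.Dict.getD d n ("Photo of " ++ L)) "{name}" L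
      = PySem.Str.replace (PySem.Dict.getD d n "Photo of {name}") "{name}" L := by
  rw [PySem.Dict.getD_eq_get?_getD, PySem.Dict.getD_eq_get?_getD]
  cases PySem.Dict.get? d n with
  | some v => rfl
  | none =>
    simp only [Option.getD]
    exact pv_leaf1 "Photo of " L "Photo of {name}" hL (by decide) (by decide)

-- min of a list of elements all ≥ the start is the start
lemma pv_foldl_min_const (L : List Int) (i : Int) (h : ∀ y ∈ L, i ≤ y) : L.foldl min i = i := by
  induction L with
  | nil => rfl
  | cons y t ih =>
    have : min i y = i := min_eq_left (h y (List.mem_cons_self ..))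
    simp only [List.foldl_cons, this]
    exact ih (fun z hz => h z (List.mem_cons_of_mem _ hz))

-- one group of the flat index: min over (group i's keywords ++ rest) is i if the group matches
lemma pv_min_step (d : String) (kws : List String) (i : Int) (rest : List (String × Int))
    (h : ∀ pr ∈ rest, i ≤ pr.2) :
    PySem.List.min? (((kws.map (fun k => (k, i))) ++ rest).filterMap (pvSel d)) (fun x => x)
      = if kws.any (fun word => PySem.Str.isIn word d) then some i
        else PySem.List.min? (rest.filterMap (pvSel d)) (fun x => x) := by
  induction kws with
  | nil => simp
  | cons k t ih =>
    by_cases hk : PySem.Str.isIn k d = true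
    · have hk' : PySem.Chars.isIn k.toList d.toList = true := by simpa using hk
      have hsel : pvSel d (k, i) = some i := by simp [pvSel, hk']
      simp only [List.map_cons, List.cons_append, List.filterMap_cons, hsel, List.any_cons, hk,
        Bool.true_or, if_true]
      rw [PySem.List.min?_id_cons]
      congr 1
      refine pv_foldl_min_const _ _ ?_
      intro y hy
      obtain ⟨pr, hpr, hprs⟩ := List.mem_filterMap.mp hy
      have hy2 : y = pr.2 := by
        rcases pr with ⟨s, j⟩
        by_cases hin : PySem.Chars.isIn s.toList d.toList = true
        · have hs : pvSel d (s, j) = some j := by simp [pvSel, hin]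
          rw [hs] at hprs; exact (Option.some.inj hprs).symm
        · have hs : pvSel d (s, j) = none := by simp [pvSel, hin]
          rw [hs] at hprs; cases hprs
      rcases List.mem_append.mp hpr with hm | hm
      · obtain ⟨k', _, hk'⟩ := List.mem_map.mp hm
        rw [hy2, ← hk']
      · rw [hy2]; exact h pr hm
    · have hk' : PySem.Chars.isIn k.toList d.toList = false := by simpa using hk
      have hsel : pvSel d (k, i) = none := by simp [pvSel, hk']
      simp only [List.map_cons, List.cons_append, List.filterMap_cons, hsel, List.any_cons, hk,
        Bool.false_or]
      exact ih

-- the flat index as nested appends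
lemma pv_flat_eq : pvFlat =
    (["coffee", "cafe", "bakery", "restaurant", "dining"].map (fun k => (k, (0 : Int)))) ++
    ((["cabin", "cottage", "lodge", "house", "rental"].map (fun k => (k, (1 : Int)))) ++
    ((["trail", "hike", "outdoor", "nature"].map (fun k => (k, (2 : Int)))) ++
    ((["vineyard", "winery", "tasting"].map (fun k => (k, (3 : Int)))) ++
    ((["brewery", "beer", "cider"].map (fun k => (k, (4 : Int)))) ++
    ((["market", "deli", "store", "grocery"].map (fun k => (k, (5 : Int)))) ++
    ((["farm", "orchard"].map (fun k => (k, (6 : Int)))) ++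
    ((["museum", "heritage", "historical"].map (fun k => (k, (7 : Int)))) ++
    ([] : List (String × Int))))))))) := by decide

-- B's min over all matching groups is the first group (in index order) with a match
lemma pv_minhits (d : String) :
    PySem.List.min? (pvFlat.filterMap (pvSel d)) (fun x => x) =
      (if (["coffee", "cafe", "bakery", "restaurant", "dining"] : List String).any (fun word => PySem.Str.isIn word d) then some (0 : Int)
       else if (["cabin", "cottage", "lodge", "house", "rental"] : List String).any (fun word => PySem.Str.isIn word d) then some 1
       else if (["trail", "hike", "outdoor", "nature"] : List String).any (fun word => PySem.Str.isIn word d) then some 2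
       else if (["vineyard", "winery", "tasting"] : List String).any (fun word => PySem.Str.isIn word d) then some 3
       else if (["brewery", "beer", "cider"] : List String).any (fun word => PySem.Str.isIn word d) then some 4
       else if (["market", "deli", "store", "grocery"] : List String).any (fun word => PySem.Str.isIn word d) then some 5
       else if (["farm", "orchard"] : List String).any (fun word => PySem.Str.isIn word d) then some 6
       else if (["museum", "heritage", "historical"] : List String).any (fun word => PySem.Str.isIn word d) then some 7
       else none) := by
  rw [pv_flat_eq]
  rw [pv_min_step d _ 0 _ (by decide), pv_min_step d _ 1 _ (by decide),
    pv_min_step d _ 2 _ (by decide), pv_min_step d _ 3 _ (by decide),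
    pv_min_step d _ 4 _ (by decide), pv_min_step d _ 5 _ (by decide),
    pv_min_step d _ 6 _ (by decide), pv_min_step d _ 7 _ (by decide)]
  have hnil : PySem.List.min? (([] : List (String × Int)).filterMap (pvSel d)) (fun x : Int => x) = none := by
    simp [PySem.List.min?_eq_none_iff]
  rw [hnil]

-- B's match-on-min reduced to a nested-if chain over the same group conditions
lemma pv_match_eq (d : String) (n : Int) (base2 : String) :
    pvMinPick n base2 d
    = (if (["coffee", "cafe", "bakery", "restaurant", "dining"] : List String).any (fun word => PySem.Str.isIn word d) then
         (if n > 1 then "Dining area at {name}" else "Exterior of {name} restaurant")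
       else if (["cabin", "cottage", "lodge", "house", "rental"] : List String).any (fun word => PySem.Str.isIn word d) then
         (if n > 1 then "Interior of {name}" else "Exterior view of {name}")
       else if (["trail", "hike", "outdoor", "nature"] : List String).any (fun word => PySem.Str.isIn word d) then
         (if n > 1 then "Scenic view from {name}" else "Scenic view from {name}")
       else if (["vineyard", "winery", "tasting"] : List String).any (fun word => PySem.Str.isIn word d) then
         (if n > 1 then "Tasting room at {name}" else "Vineyard at {name}")
       else if (["brewery", "beer", "cider"] : List String).any (fun word => PySem.Str.isIn word d) then
         (if n > 1 then "Taproom at {name}" else "Exterior of {name} brewery")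
       else if (["market", "deli", "store", "grocery"] : List String).any (fun word => PySem.Str.isIn word d) then
         (if n > 1 then "Interior of {name}" else "Storefront of {name}")
       else if (["farm", "orchard"] : List String).any (fun word => PySem.Str.isIn word d) then
         (if n > 1 then "Farm view at {name}" else "Exterior of {name} farm")
       else if (["museum", "heritage", "historical"] : List String).any (fun word => PySem.Str.isIn word d) then
         (if n > 1 then "Exhibit at {name}" else "Exterior of {name} museum")
       else base2) := by
  unfold pvMinPick
  simp only [pv_minhits d]
  split_ifs <;> rfl

-- the keyword-selection step: A's if/elif chain and B's min-over-matches pick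
-- descriptions that agree after the '{name}' substitution
set_option maxHeartbeats 4000000 in
lemma pv_keyword_eq (L desc_lower base1 base2 : String) (n : Int) (hL : '{' ∉ L.toList)
    (h0 : PySem.Str.replace base1 "{name}" L = PySem.Str.replace base2 "{name}" L) :
    PySem.Str.replace (pvKeywordChain L n desc_lower base1) "{name}" L =
      PySem.Str.replace (pvMinPick n base2 desc_lower) "{name}" L := by
  have e1 := pv_leaf1 "Dining area at " L "Dining area at {name}" hL (by decide) (by decide)
  have e2 := pv_leaf2 "Exterior of " " restaurant" L "Exterior of {name} restaurant" hL (by decide) (by decide) (by decide)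
  have e3 := pv_leaf1 "Interior of " L "Interior of {name}" hL (by decide) (by decide)
  have e4 := pv_leaf1 "Exterior view of " L "Exterior view of {name}" hL (by decide) (by decide)
  have e5 := pv_leaf1 "Scenic view from " L "Scenic view from {name}" hL (by decide) (by decide)
  have e6 := pv_leaf1 "Tasting room at " L "Tasting room at {name}" hL (by decide) (by decide)
  have e7 := pv_leaf1 "Vineyard at " L "Vineyard at {name}" hL (by decide) (by decide)
  have e8 := pv_leaf1 "Taproom at " L "Taproom at {name}" hL (by decide) (by decide)
  have e9 := pv_leaf2 "Exterior of " " brewery" L "Exterior of {name} brewery" hL (by decide) (by decide) (by decide)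
  have e10 := pv_leaf1 "Storefront of " L "Storefront of {name}" hL (by decide) (by decide)
  have e11 := pv_leaf1 "Farm view at " L "Farm view at {name}" hL (by decide) (by decide)
  have e12 := pv_leaf1 "Exhibit at " L "Exhibit at {name}" hL (by decide) (by decide)
  have e13 := pv_leaf2 "Exterior of " " farm" L "Exterior of {name} farm" hL (by decide) (by decide) (by decide)
  have e14 := pv_leaf2 "Exterior of " " museum" L "Exterior of {name} museum" hL (by decide) (by decide) (by decide)
  rw [pv_match_eq desc_lower n base2]
  unfold pvKeywordChain
  split_ifs
  exacts [e1, e2, e3, e4, e5, e5, e6, e7, e8, e9, e3, e10, e11, e13, e12, e14, h0]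

-- ===== VERDICT (by name: the statement is the Claim_ definition above) =====
set_option maxHeartbeats 4000000 in
theorem generate_simple_description_spec : Claim_equal_generate_simple_description := by
  intro L n t _ hPre
  have hL : '{' ∉ L.toList := by
    intro hmem
    obtain ⟨u, v, huv⟩ := List.append_of_mem hmem
    have hone : ("{" : String).toList = ['{'] := by decide
    have : PySem.Str.isIn "{" L = true := by
      rw [PySem.Str.isIn_iff_infix, hone]
      exact ⟨u, v, by rw [huv]; simp⟩
    rw [hPre.1] at this
    cases this
  show generate_simple_description L n t = generate_simple_description_alt L n t
  simp only [generate_simple_description, generate_simple_description_alt, pvBase]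
  have h0 := pv_dict_leaf (PySem.Dict.ofList [(1, "Exterior view of {name}"), (2, "Interior view of {name}"), (3, "Additional photo of {name}")]) n L hL
  refine congrArg pvTruncate ?_
  split_ifs with ht
  · exact pv_keyword_eq L (PySem.Str.lower t)
      (PySem.Dict.getD (PySem.Dict.ofList [(1, "Exterior view of {name}"), (2, "Interior view of {name}"), (3, "Additional photo of {name}")]) n ("Photo of " ++ L))
      (PySem.Dict.getD (PySem.Dict.ofList [(1, "Exterior view of {name}"), (2, "Interior view of {name}"), (3, "Additional photo of {name}")]) n "Photo of {name}") n hL h0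
  · exact h0
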